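-- pv_equiv track=rewrite | github.com/lnbe10/Courses | nand2tetris/projects/06/assembler_2/structuring.py | instruction_address_counter
-- ===== SOURCE A (Python) =====
-- def instruction_address_counter(lines):
-- 	instr_counter = [];
-- 	counter = 0;
-- 	for i in range(len(lines)):
-- 		instr_counter.append([]);
-- 		line = lines[i];
-- 		if line[0] != '(':
-- 			instr_counter[i].append(i);
-- 			instr_counter[i].append(counter);
-- 			counter += 1;
-- 		else:
-- 			instr_counter[i].append(i);
-- 			instr_counter[i].append(counter);
-- 	return instr_counter;
-- ===== SOURCE B (Python) =====
-- def instruction_address_counter(lines):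
--     # prefix-sum decomposition: flags pass, running-prefix pass, then one zip/enumerate pass
--     flags = [0 if line[0] == '(' else 1 for line in lines]
--     prefix = [0]
--     c = 0
--     for f in flags:
--         c += f
--         prefix.append(c)
--     return [[i, c] for i, (line, c) in enumerate(zip(lines, prefix))]
-- ===== Notes on version B (the rewrite author's own statement) =====
-- stated objective: alternative
-- what changed: Replaces the single loop with an in-place running counter and list mutation by a three-pass decomposition: a flag list, a precomputed prefix-sum table, and one enumerate/zip pass producing the pairs.
import Mathlib
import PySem

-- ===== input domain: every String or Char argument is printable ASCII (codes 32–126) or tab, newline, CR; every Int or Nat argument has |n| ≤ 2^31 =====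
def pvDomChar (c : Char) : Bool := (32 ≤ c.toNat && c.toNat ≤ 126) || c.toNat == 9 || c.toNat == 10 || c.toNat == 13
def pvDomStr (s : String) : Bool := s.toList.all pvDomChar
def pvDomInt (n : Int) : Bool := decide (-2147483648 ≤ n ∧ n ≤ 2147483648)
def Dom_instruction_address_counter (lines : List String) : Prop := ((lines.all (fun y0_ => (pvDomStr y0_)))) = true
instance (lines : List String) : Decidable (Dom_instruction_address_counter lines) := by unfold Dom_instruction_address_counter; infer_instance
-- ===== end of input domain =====

-- B differs from A by decomposition only (flags + prefix-sum table + one enumerate/zip pass); equal cost.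

-- ===== PORT A =====
-- A's loop over range(len(lines)) with a running counter, transcribed as structural
-- recursion carrying the index i and the counter c; each iteration appends [i, c].
def pvGoA : List String → Int → Int → List (List Int)
  | [], _, _ => []
  | l :: rest, i, c =>
    if PySem.Str.pyGet? l 0 ≠ some '(' then
      [i, c] :: pvGoA rest (i + 1) (c + 1)
    else
      [i, c] :: pvGoA rest (i + 1) c

def instruction_address_counter (lines : List String) : List (List Int) :=
  pvGoA lines 0 0

-- ===== PORT B =====
-- Source B: flags list, prefix-sum list (the running-value loop = scanl), then one
-- comprehension over enumerate(zip(lines, prefix)).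
def instruction_address_counter_alt (lines : List String) : List (List Int) :=
  let flags : List Int := lines.map (fun line => if PySem.Str.pyGet? line 0 = some '(' then 0 else 1)
  let pref : List Int := List.scanl (· + ·) 0 flags
  (PySem.List.enumerate (lines.zip pref)).map (fun p => [p.1, p.2.2])

-- ===== PRECONDITION & SPEC =====
-- Pre_ excludes lists containing an empty string: there both A and B raise IndexError (line[0]).
def Pre_instruction_address_counter (lines : List String) : Prop :=
  ∀ l ∈ lines, l ≠ ""
instance (lines : List String) : Decidable (Pre_instruction_address_counter lines) := by
  unfold Pre_instruction_address_counter; infer_instance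

def pvWitness_instruction_address_counter : List String := ["@2", "(LOOP)", "D=A"]

def Spec_instruction_address_counter (lines : List String) (out : List (List Int)) : Prop := out = instruction_address_counter_alt lines
instance (lines : List String) (out : List (List Int)) : Decidable (Spec_instruction_address_counter lines out) := by unfold Spec_instruction_address_counter; infer_instance

-- ===== CLAIM =====
def Claim_equal_instruction_address_counter : Prop := ∀ (lines : List String), Dom_instruction_address_counter lines → Pre_instruction_address_counter lines → Spec_instruction_address_counter lines (instruction_address_counter lines)

-- ===== LEMMAS AND PROOFS =====

-- the loop of A equals B's enumerate-of-zip-with-prefix shape, generalized over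
-- the start index k and the initial counter c
lemma pvGoA_eq (lines : List String) (c : Int) (k : Int) :
    pvGoA lines k c =
      (PySem.List.enumerate
        (lines.zip (List.scanl (· + ·) c
          (lines.map (fun line => if PySem.Str.pyGet? line 0 = some '(' then (0 : Int) else 1)))) k).map
        (fun p => [p.1, p.2.2]) := by
  induction lines generalizing c k with
  | nil => simp [pvGoA]
  | cons l rest ih =>
    by_cases h : PySem.Str.pyGet? l 0 = some '('
    · simp only [pvGoA]
      rw [if_neg (not_not_intro h), List.map_cons, List.scanl_cons, if_pos h, add_zero,
        List.zip_cons_cons, PySem.List.enumerate_cons, List.map_cons]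
      exact congrArg _ (ih c (k + 1))
    · simp only [pvGoA]
      rw [if_pos h, List.map_cons, List.scanl_cons, if_neg h,
        List.zip_cons_cons, PySem.List.enumerate_cons, List.map_cons]
      exact congrArg _ (ih (c + 1) (k + 1))

-- ===== VERDICT =====
theorem instruction_address_counter_spec : Claim_equal_instruction_address_counter := by
  intro lines _ _
  unfold Spec_instruction_address_counter instruction_address_counter instruction_address_counter_alt
  exact pvGoA_eq lines 0 0
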